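-- pv_equiv track=rewrite | github.com/Francisco-Miguel-Ruiz-Ibanez-1997/simulador_reducciones_polinomicas | modulos_externos/reduccion_cook_levin/execute_controller.py | crearConfiguracionInicial
-- ===== SOURCE A (Python) =====
-- def crearConfiguracionInicial(entrada, estadoInicial, n, blanco):
--     filaTabla=[]
--     estado = 'q'+estadoInicial
--     tam = len(entrada)+2 #le sumo dos porque la j la posicion 0 y 1 son espacios ocupados
--
--     for j in range(0,n,1):
--         if(j <tam):
--             if(j == 1):
--                 filaTabla.append(estado)
--             elif(j == 0):
--                 filaTabla.append('#')
--             else: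
--                 filaTabla.append(entrada[j-2])
--         elif (j == n-1):
--             filaTabla.append('#')
--         else:
--             filaTabla.append(blanco)
--
--     return filaTabla
-- ===== SOURCE B (Python) =====
-- def crearConfiguracionInicial(entrada, estadoInicial, n, blanco):
--     base = ['#', 'q' + estadoInicial] + list(entrada)
--     tam = len(base)
--     if n <= tam:
--         return base[:max(n, 0)]
--     return base + [blanco] * (n - tam - 1) + ['#']
-- ===== Notes on version B (the rewrite author's own statement) =====
-- stated objective: simpler
-- what changed: Builds the tape as three contiguous segments (header+input, blank padding, final '#') with one slice/concatenation instead of an O(n) per-cell if/elif ladder inside a loop.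
import Mathlib
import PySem

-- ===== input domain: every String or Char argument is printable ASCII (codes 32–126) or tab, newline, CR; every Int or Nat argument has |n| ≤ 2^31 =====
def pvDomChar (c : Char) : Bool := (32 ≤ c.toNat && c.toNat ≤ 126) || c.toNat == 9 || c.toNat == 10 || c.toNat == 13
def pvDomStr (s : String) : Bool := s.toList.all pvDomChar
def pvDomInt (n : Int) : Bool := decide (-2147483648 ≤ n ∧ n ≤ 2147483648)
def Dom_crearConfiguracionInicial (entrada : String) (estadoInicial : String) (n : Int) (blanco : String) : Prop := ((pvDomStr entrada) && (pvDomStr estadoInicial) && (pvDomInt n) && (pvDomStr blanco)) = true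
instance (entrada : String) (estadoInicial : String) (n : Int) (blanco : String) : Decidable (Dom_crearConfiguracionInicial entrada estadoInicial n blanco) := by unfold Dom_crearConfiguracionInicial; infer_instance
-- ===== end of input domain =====

-- B builds the tape as three contiguous segments (slice / concatenation) instead of A's
-- per-cell if/elif ladder inside the loop; objective: simpler. A and B agree on all inputs.

-- ===== PORT A =====
-- entrada[j-2] is only evaluated for 2 ≤ j < len(entrada)+2, where it never raises;
-- Option.toList turns the (always `some`) pyGet? result into the 1-char string Python appends.
def crearConfiguracionInicial (entrada : String) (estadoInicial : String) (n : Int) (blanco : String) : List String :=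
  let estado := "q" ++ estadoInicial
  let tam : Int := (PySem.Str.len entrada) + 2
  (PySem.List.pyRange 0 n 1).foldl (fun filaTabla j =>
    if j < tam then
      if j = 1 then filaTabla ++ [estado]
      else if j = 0 then filaTabla ++ ["#"]
      else filaTabla ++ [String.ofList (PySem.Str.pyGet? entrada (j - 2)).toList]
    else if j = n - 1 then filaTabla ++ ["#"]
    else filaTabla ++ [blanco]) []

-- ===== PORT B =====
def crearConfiguracionInicial_alt (entrada : String) (estadoInicial : String) (n : Int) (blanco : String) : List String :=
  let base : List String := "#" :: ("q" ++ estadoInicial) :: entrada.toList.map (fun c => String.ofList [c])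
  let tam : Int := base.length
  if n ≤ tam then base.take (max n 0).toNat
  else base ++ List.replicate (n - tam - 1).toNat blanco ++ ["#"]

-- ===== PRECONDITION & SPEC =====
def Spec_crearConfiguracionInicial (entrada : String) (estadoInicial : String) (n : Int) (blanco : String) (out : List String) : Prop := out = crearConfiguracionInicial_alt entrada estadoInicial n blanco
instance (entrada : String) (estadoInicial : String) (n : Int) (blanco : String) (out : List String) : Decidable (Spec_crearConfiguracionInicial entrada estadoInicial n blanco out) := by unfold Spec_crearConfiguracionInicial; infer_instance

-- ===== CLAIM (what is proved, stated in full; the proofs are below) =====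
def Claim_equal_crearConfiguracionInicial : Prop := ∀ (entrada : String) (estadoInicial : String) (n : Int) (blanco : String), Dom_crearConfiguracionInicial entrada estadoInicial n blanco → Spec_crearConfiguracionInicial entrada estadoInicial n blanco (crearConfiguracionInicial entrada estadoInicial n blanco)

-- ===== LEMMAS AND PROOFS =====

-- the cell A's loop body writes at index j
def pvCell (entrada : String) (estadoInicial : String) (n : Int) (blanco : String) (j : Int) : String :=
  let estado := "q" ++ estadoInicial
  let tam : Int := (PySem.Str.len entrada) + 2
  if j < tam then
    if j = 1 then estado
    else if j = 0 then "#"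
    else String.ofList (PySem.Str.pyGet? entrada (j - 2)).toList
  else if j = n - 1 then "#"
  else blanco

theorem pvA_eq_map (entrada estadoInicial : String) (n : Int) (blanco : String) :
    crearConfiguracionInicial entrada estadoInicial n blanco
      = (PySem.List.pyRange 0 n 1).map (pvCell entrada estadoInicial n blanco) := by
  unfold crearConfiguracionInicial
  have h : (fun (filaTabla : List String) (j : Int) =>
      if j < (PySem.Str.len entrada) + 2 then
        if j = 1 then filaTabla ++ ["q" ++ estadoInicial]
        else if j = 0 then filaTabla ++ ["#"]
        else filaTabla ++ [String.ofList (PySem.Str.pyGet? entrada (j - 2)).toList]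
      else if j = n - 1 then filaTabla ++ ["#"]
      else filaTabla ++ [blanco])
      = (fun filaTabla j => filaTabla ++ [pvCell entrada estadoInicial n blanco j]) := by
    funext acc j
    simp only [pvCell]
    split_ifs <;> rfl
  simp only [h]
  exact PySem.List.foldl_append_singleton_eq_map _ _ _

-- ===== VERDICT (by name: the statement is the Claim_ definition above) =====
theorem pvMain (entrada estadoInicial : String) (n : Int) (blanco : String) :
    crearConfiguracionInicial entrada estadoInicial n blanco
      = crearConfiguracionInicial_alt entrada estadoInicial n blanco := by
  rw [pvA_eq_map]
  set base : List String :=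
    "#" :: ("q" ++ estadoInicial) :: entrada.toList.map (fun c => String.ofList [c]) with hbasedef
  have hBdef : crearConfiguracionInicial_alt entrada estadoInicial n blanco
      = if n ≤ (base.length : Int) then base.take (max n 0).toNat
        else base ++ List.replicate (n - (base.length : Int) - 1).toNat blanco ++ ["#"] := rfl
  rw [hBdef]
  set lenE := entrada.toList.length with hlenE
  have hbl : base.length = lenE + 2 := by
    simp [hbasedef, hlenE, -String.length_toList]
  have hlen : PySem.Str.len entrada = (lenE : Int) := by simp [pysem, hlenE]
  have hbase : ∀ j (hj : j < lenE + 2),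
      base[j]'(by omega)
        = (if j = 1 then "q" ++ estadoInicial else if j = 0 then "#"
           else String.ofList (PySem.Str.pyGet? entrada ((j:Int) - 2)).toList) := by
    intro j hj
    match j with
    | 0 => simp [hbasedef]
    | 1 => simp [hbasedef]
    | (k+2) =>
      have hk : k < lenE := by omega
      simp only [hbasedef, List.getElem_cons_succ, List.getElem_map]
      have h2 : ((k+2 : Nat):Int) - 2 = ((k:Nat):Int) := by omega
      rw [if_neg (by omega), if_neg (by omega), h2]
      have hg : PySem.Str.pyGet? entrada ((k:Nat):Int) = some entrada.toList[k] := by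
        simp [pysem]
      rw [hg]
      rfl
  by_cases hn : n ≤ 0
  · have h1 : PySem.List.pyRange 0 n 1 = [] := PySem.List.pyRange_one_eq_nil hn
    have h2 : (max n 0).toNat = 0 := by omega
    rw [h1, if_pos (by omega), h2]
    simp
  · have hm : n = ((n.toNat : Nat) : Int) := by omega
    rw [hm, PySem.List.pyRange_zero_natCast, List.map_map]
    set m := n.toNat with hmdef
    have hcell : ∀ i : Nat, pvCell entrada estadoInicial (↑m) blanco (↑i)
        = if i < lenE + 2 then
            (if i = 1 then "q" ++ estadoInicial else if i = 0 then "#"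
             else String.ofList (PySem.Str.pyGet? entrada ((i:Int) - 2)).toList)
          else if i = m - 1 then "#" else blanco := by
      intro i
      simp only [pvCell, hlen]
      have c1 : ((i:Int) < (lenE:Int) + 2) ↔ i < lenE + 2 := by omega
      have c2 : ((i:Int) = 1) ↔ i = 1 := by omega
      have c3 : ((i:Int) = 0) ↔ i = 0 := by omega
      have c4 : ((i:Int) = (m:Int) - 1) ↔ i = m - 1 := by omega
      simp only [c1, c2, c3, c4]
    by_cases hle : ((m:Nat):Int) ≤ (base.length : Int)
    · -- truncation branch
      rw [if_pos hle]
      have hmax : (max ((m:Nat):Int) 0).toNat = m := by omega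
      rw [hmax]
      have hmle : m ≤ lenE + 2 := by omega
      apply List.ext_getElem
      · simp; omega
      · intro i hi1 hi2
        simp only [List.length_map, List.length_range] at hi1
        rw [List.getElem_map, List.getElem_range, List.getElem_take]
        show pvCell entrada estadoInicial (↑m) blanco (↑i) = _
        rw [hcell i, if_pos (by omega), hbase i (by omega)]
    · -- padded branch
      rw [if_neg hle]
      have hmgt : lenE + 2 < m := by omega
      apply List.ext_getElem
      · simp; omega
      · intro i hi1 hi2
        simp only [List.length_map, List.length_range] at hi1
        rw [List.getElem_map, List.getElem_range]
        show pvCell entrada estadoInicial (↑m) blanco (↑i) = _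
        rw [hcell i]
        by_cases hib : i < lenE + 2
        · rw [if_pos hib, List.getElem_append_left (by simp only [List.length_append, List.length_replicate, hbl]; omega),
              List.getElem_append_left (by omega), hbase i hib]
        · rw [if_neg hib]
          by_cases hlast : i = m - 1
          · rw [if_pos hlast,
                List.getElem_append_right (by simp only [List.length_append, List.length_replicate, hbl]; omega)]
            simp
          · rw [if_neg hlast,
                List.getElem_append_left (by simp only [List.length_append, List.length_replicate, hbl]; omega),
                List.getElem_append_right (by omega)]
            simp

-- ===== VERDICT (by name: the statement is the Claim_ definition above) =====
theorem crearConfiguracionInicial_spec : Claim_equal_crearConfiguracionInicial := by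
  intro entrada estadoInicial n blanco _
  unfold Spec_crearConfiguracionInicial
  exact pvMain entrada estadoInicial n blanco
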